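-- pv_equiv track=rewrite | github.com/bnb32/modbot | modbot/utilities/utilities.py | curvature
-- ===== SOURCE A (Python) =====
-- def curvature(a):
--     """Calculate curvature of a vector"""
--     b = [0] * len(a)
--     for i, _ in enumerate(b):
--         if 0 < i < len(a) - 1:
--             b[i] = (a[i + 1] - 2 * a[i] + a[i - 1])
--         elif i == 0:
--             b[i] = (a[i + 1] - 2 * a[i])
--         elif i == len(a) - 1:
--             b[i] = (-2 * a[i] + a[i - 1])
--     return b
-- ===== SOURCE B (Python) =====
-- def curvature(a):
--     """Calculate curvature of a vector"""
--     p = [0] + list(a) + [0]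
--     return [x - 2 * y + z for x, y, z in zip(p[2:], p[1:], p)]
-- ===== Notes on version B (the rewrite author's own statement) =====
-- stated objective: simpler
-- what changed: B zero-pads the vector on both ends and computes one uniform second difference via zip over three shifted slices, replacing A's indexed loop with a per-iteration three-way branch.
-- outside the precondition, e.g. on curvature([5]): A raises IndexError, B returns [-10]
import Mathlib
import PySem

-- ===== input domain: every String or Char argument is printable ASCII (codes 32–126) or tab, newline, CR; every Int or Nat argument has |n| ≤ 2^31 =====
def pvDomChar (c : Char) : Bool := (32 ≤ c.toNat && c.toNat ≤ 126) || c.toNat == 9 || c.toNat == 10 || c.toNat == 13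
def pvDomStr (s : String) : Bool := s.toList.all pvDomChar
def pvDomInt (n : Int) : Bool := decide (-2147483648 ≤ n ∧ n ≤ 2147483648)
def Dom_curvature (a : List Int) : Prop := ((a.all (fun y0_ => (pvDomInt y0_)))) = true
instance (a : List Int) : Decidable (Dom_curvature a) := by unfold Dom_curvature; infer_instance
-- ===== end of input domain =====

-- B zero-pads the vector and takes one uniform second difference over three shifted slices,
-- replacing A's indexed loop with a three-way branch; same O(n) cost.

-- ===== PORT A =====
-- A indexes a[i+1], a[i], a[i-1] with indices that are in range on every input Pre_ admits
-- (the only out-of-range access, a[1] for a length-1 list, is excluded by Pre_); getD 0 is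
-- exact there.
def curvature (a : List Int) : List Int :=
  let n := a.length
  let b : List Int := List.replicate n 0
  (List.range n).foldl (fun b i =>
    b.set i (
      if 0 < i ∧ i < n - 1 then a.getD (i + 1) 0 - 2 * a.getD i 0 + a.getD (i - 1) 0
      else if i = 0 then a.getD (i + 1) 0 - 2 * a.getD i 0
      else if i = n - 1 then -2 * a.getD i 0 + a.getD (i - 1) 0
      else 0)) b

-- ===== PORT B =====
def curvature_alt (a : List Int) : List Int :=
  let p : List Int := [0] ++ a ++ [0]
  ((p.drop 2).zip ((p.drop 1).zip p)).map (fun t => t.1 - 2 * t.2.1 + t.2.2)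

-- ===== PRECONDITION & SPEC =====
-- Pre_ excludes exactly the length-1 lists, on which Python A raises IndexError (a[i+1] at i = 0).
def Pre_curvature (a : List Int) : Prop := a.length ≠ 1
instance (a : List Int) : Decidable (Pre_curvature a) := by unfold Pre_curvature; infer_instance
def pvWitness_curvature : List Int := [1, 4, 2]

def Spec_curvature (a : List Int) (out : List Int) : Prop := out = curvature_alt a
instance (a : List Int) (out : List Int) : Decidable (Spec_curvature a out) := by unfold Spec_curvature; infer_instance

-- ===== CLAIM (what is proved, stated in full; the proofs are below) =====
def Claim_equal_curvature : Prop := ∀ (a : List Int), Dom_curvature a → Pre_curvature a → Spec_curvature a (curvature a)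

-- ===== LEMMAS AND PROOFS =====

-- the value A writes at index i
def curvVal (a : List Int) (i : Nat) : Int :=
  if 0 < i ∧ i < a.length - 1 then a.getD (i + 1) 0 - 2 * a.getD i 0 + a.getD (i - 1) 0
  else if i = 0 then a.getD (i + 1) 0 - 2 * a.getD i 0
  else if i = a.length - 1 then -2 * a.getD i 0 + a.getD (i - 1) 0
  else 0

-- A's loop: writing f i at index i over range m into a buffer of length ≥ m
theorem foldl_set_range (f : Nat → Int) :
    ∀ (m : Nat) (b : List Int), m ≤ b.length →
      (List.range m).foldl (fun b i => b.set i (f i)) b = (List.range m).map f ++ b.drop m := by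
  intro m
  induction m with
  | zero => intro b _; simp
  | succ m ih =>
    intro b hm
    rw [List.range_succ, List.foldl_append, ih b (Nat.le_of_succ_le hm)]
    have hml : m < b.length := hm
    have hdrop : b.drop m = b[m]'hml :: b.drop (m + 1) := (List.drop_eq_getElem_cons hml).symm ▸ rfl
    simp only [List.foldl_cons, List.foldl_nil, List.map_append, List.map_cons,
      List.map_nil, hdrop]
    rw [List.set_append_right _ _ (by simp)]
    rw [List.length_map, List.length_range, Nat.sub_self]
    rw [List.set_cons_zero]
    simp

theorem curvature_eq_map (a : List Int) :
    curvature a = (List.range a.length).map (curvVal a) := by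
  unfold curvature
  rw [foldl_set_range _ a.length (List.replicate a.length 0) (by simp)]
  simp [curvVal]

theorem curvature_alt_eq_map (a : List Int) :
    curvature_alt a = (List.range a.length).map
      (fun i => ([0] ++ a ++ [0]).getD (i + 2) 0 - 2 * ([0] ++ a ++ [0]).getD (i + 1) 0
        + ([0] ++ a ++ [0]).getD i 0) := by
  unfold curvature_alt
  apply List.ext_getElem
  · simp
  · intro i h1 h2
    simp only [List.getElem_map, List.getElem_zip, List.getElem_drop, List.getElem_range]
    have hi : i < a.length := by simpa using h2
    rw [List.getD_eq_getElem _ _ (by simp; omega), List.getD_eq_getElem _ _ (by simp; omega),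
        List.getD_eq_getElem _ _ (by simp; omega)]
    simp only [Nat.add_comm]

-- ===== VERDICT (by name: the statement is the Claim_ definition above) =====
theorem curvature_spec : Claim_equal_curvature := by
  intro a _ hpre
  unfold Spec_curvature
  rw [curvature_eq_map, curvature_alt_eq_map]
  apply List.map_congr_left
  intro i hi
  rw [List.mem_range] at hi
  unfold curvVal
  have hlen : a.length ≠ 1 := hpre
  have hpA : ∀ j, j < a.length → ([0] ++ a ++ [0]).getD (j + 1) 0 = a.getD j 0 := by
    intro j hj
    rw [List.getD_eq_getElem _ _ (by simp; omega), List.getD_eq_getElem _ _ hj]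
    simp [hj]
  have hpTop : ([0] ++ a ++ [0]).getD (a.length + 1) 0 = 0 := by
    rw [List.getD_eq_getElem _ _ (by simp)]
    simp
  split_ifs with h1 h2 h3
  · -- interior
    have e1 : ([0] ++ a ++ [0]).getD (i + 2) 0 = a.getD (i + 1) 0 := hpA (i + 1) (by omega)
    have e2 : ([0] ++ a ++ [0]).getD (i + 1) 0 = a.getD i 0 := hpA i hi
    have e3 : ([0] ++ a ++ [0]).getD i 0 = a.getD (i - 1) 0 := by
      have := hpA (i - 1) (by omega)
      rwa [show i - 1 + 1 = i by omega] at this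
    rw [e1, e2, e3]
  · -- i = 0 (a.length ≥ 2: length 1 is excluded by Pre_, length 0 has empty range)
    subst h2
    have e1 : ([0] ++ a ++ [0]).getD (0 + 2) 0 = a.getD 1 0 := hpA 1 (by omega)
    have e2 : ([0] ++ a ++ [0]).getD (0 + 1) 0 = a.getD 0 0 := hpA 0 hi
    have e0 : ([0] ++ a ++ [0]).getD 0 0 = 0 := rfl
    rw [e1, e2, e0]
    ring
  · -- i = a.length - 1 (and i ≠ 0, so a.length ≥ 2)
    have eTop : ([0] ++ a ++ [0]).getD (i + 2) 0 = 0 := by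
      have := hpTop
      rwa [show a.length + 1 = i + 2 by omega] at this
    have e2 : ([0] ++ a ++ [0]).getD (i + 1) 0 = a.getD i 0 := hpA i hi
    have e3 : ([0] ++ a ++ [0]).getD i 0 = a.getD (i - 1) 0 := by
      have := hpA (i - 1) (by omega)
      rwa [show i - 1 + 1 = i by omega] at this
    rw [eTop, e2, e3]
    ring
  · omega
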